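-- pv_equiv track=rewrite | github.com/JananiVenk/Fundamentals-of-Artificial-Intelligence | hw2.py | MULT_DFS
-- ===== SOURCE A (Python) =====
-- def FINAL_STATE(S):
--     return S==(True,True,True,True)
--
-- def NEXT_STATE(S, A):
--     S=list(S)
--     if A=='h':
--         S[0]=not(S[0])
--     elif A=='b' and S[0]==S[1]:
--         S[0],S[1]=not(S[0]),not(S[1])
--     elif A=='d' and S[0]==S[2]:
--         S[0],S[2]=not(S[0]),not(S[2])
--     elif A=='p' and S[0]==S[3]:
--         S[0],S[3]=not(S[0]),not(S[3])
--     else: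
--         return []
--     if (S[1]==S[2] and S[0]!=S[1]) or (S[1]==S[3] and S[0]!=S[1]):
--         return []
--     else:
--         return tuple(S)
--
-- def SUCC_FN(S):
--     states=[]
--     for A in ['h','b','d','p']:
--         next_state=NEXT_STATE(S,A)
--         if next_state!=[]:
--             states.append(next_state)
--     return states
--
-- def ON_PATH(S, STATES):
--     return S in STATES
--
-- def MULT_DFS(STATES, PATH):
--     for s in STATES:
--         if FINAL_STATE(s):
--             PATH.append(s)
--             return PATH
--         elif ON_PATH(s,PATH):
--             continue
--         else:
--             PATH.append(s)
--             MULT_DFS(SUCC_FN(s),PATH)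
--     return []
-- ===== SOURCE B (Python) =====
-- def FINAL_STATE(S):
--     return S==(True,True,True,True)
--
-- def NEXT_STATE(S, A):
--     S=list(S)
--     if A=='h':
--         S[0]=not(S[0])
--     elif A=='b' and S[0]==S[1]:
--         S[0],S[1]=not(S[0]),not(S[1])
--     elif A=='d' and S[0]==S[2]:
--         S[0],S[2]=not(S[0]),not(S[2])
--     elif A=='p' and S[0]==S[3]:
--         S[0],S[3]=not(S[0]),not(S[3])
--     else:
--         return []
--     if (S[1]==S[2] and S[0]!=S[1]) or (S[1]==S[3] and S[0]!=S[1]):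
--         return []
--     else:
--         return tuple(S)
--
-- def SUCC_FN(S):
--     states=[]
--     for A in ['h','b','d','p']:
--         next_state=NEXT_STATE(S,A)
--         if next_state!=[]:
--             states.append(next_state)
--     return states
--
-- def ON_PATH(S, STATES):
--     return S in STATES
--
-- def MULT_DFS(STATES, PATH):
--     # iterative DFS with an explicit stack of frames (one frame per recursion level)
--     stack = [list(STATES)]
--     while stack:
--         frame = stack[-1]
--         if not frame:
--             stack.pop()
--             continue
--         s = frame.pop(0)
--         if FINAL_STATE(s):
--             PATH.append(s)
--             stack.pop()          # a final state aborts its own frame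
--             if not stack:        # it was the top-level frame: return the path
--                 return PATH
--         elif ON_PATH(s, PATH):
--             continue
--         else:
--             PATH.append(s)
--             stack.append(SUCC_FN(s))
--     return []
-- ===== Notes on version B (the rewrite author's own statement) =====
-- stated objective: alternative
-- what changed: Replaces A's recursive DFS (whose recursive return value is ignored) by an iterative while-loop over an explicit stack of frames, one frame per recursion level, with the same PATH appends and the same return rule (PATH only when a final state is hit in the top-level frame).
import Mathlib
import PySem

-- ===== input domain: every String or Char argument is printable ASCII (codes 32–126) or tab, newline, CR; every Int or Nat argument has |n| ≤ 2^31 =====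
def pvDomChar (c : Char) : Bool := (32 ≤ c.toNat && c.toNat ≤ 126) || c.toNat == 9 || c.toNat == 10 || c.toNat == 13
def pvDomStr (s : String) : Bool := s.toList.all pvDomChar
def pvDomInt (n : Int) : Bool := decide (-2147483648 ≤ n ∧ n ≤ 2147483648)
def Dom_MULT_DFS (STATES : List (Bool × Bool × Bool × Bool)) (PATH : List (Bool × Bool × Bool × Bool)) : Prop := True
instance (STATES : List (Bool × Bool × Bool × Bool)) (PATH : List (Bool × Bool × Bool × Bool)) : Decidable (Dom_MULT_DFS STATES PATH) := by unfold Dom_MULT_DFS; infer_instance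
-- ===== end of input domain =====

-- B replaces A's recursion by an explicit stack of frames (alternative decomposition, same cost);
-- both Pythons mutate PATH in place by the same appends, the equivalence proved is about the return value.

-- ===== PORT A =====
def FINAL_STATE (S : Bool × Bool × Bool × Bool) : Bool := S == (true, true, true, true)

-- Python NEXT_STATE returns [] or a tuple; ported as Option (none = []).
def NEXT_STATE (S : Bool × Bool × Bool × Bool) (A : Char) : Option (Bool × Bool × Bool × Bool) :=
  let s0 := S.1; let s1 := S.2.1; let s2 := S.2.2.1; let s3 := S.2.2.2
  let S' : Option (Bool × Bool × Bool × Bool) :=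
    if A == 'h' then some (!s0, s1, s2, s3)
    else if A == 'b' && s0 == s1 then some (!s0, !s1, s2, s3)
    else if A == 'd' && s0 == s2 then some (!s0, s1, !s2, s3)
    else if A == 'p' && s0 == s3 then some (!s0, s1, s2, !s3)
    else none
  match S' with
  | none => none
  | some T =>
    if (T.2.1 == T.2.2.1 && T.1 != T.2.1) || (T.2.1 == T.2.2.2 && T.1 != T.2.1) then none
    else some T

def SUCC_FN (S : Bool × Bool × Bool × Bool) : List (Bool × Bool × Bool × Bool) :=
  ['h', 'b', 'd', 'p'].foldl
    (fun states A =>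
      match NEXT_STATE S A with
      | none => states
      | some ns => states ++ [ns]) []

def ON_PATH (S : Bool × Bool × Bool × Bool) (STATES : List (Bool × Bool × Bool × Bool)) : Bool :=
  decide (S ∈ STATES)

-- helper facts the ports cite for termination (there are only 16 possible states)
theorem pvCard_le16 (P : List (Bool × Bool × Bool × Bool)) : P.toFinset.card ≤ 16 := by
  have h := Finset.card_le_univ P.toFinset
  have hu : Fintype.card (Bool × Bool × Bool × Bool) = 16 := by simp
  omega

theorem pvCard_lt16 {P : List (Bool × Bool × Bool × Bool)} {s : Bool × Bool × Bool × Bool}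
    (h : s ∉ P) : P.toFinset.card < 16 := by
  have h1 : s ∉ P.toFinset := by simpa using h
  have h2 := Finset.card_lt_univ_of_notMem h1
  have hu : Fintype.card (Bool × Bool × Bool × Bool) = 16 := by simp
  omega

theorem pvCard_append {P : List (Bool × Bool × Bool × Bool)} {s : Bool × Bool × Bool × Bool}
    (h : s ∉ P) : (P ++ [s]).toFinset.card = P.toFinset.card + 1 := by
  have he : (P ++ [s]).toFinset = insert s P.toFinset := by
    ext x; simp
  rw [he, Finset.card_insert_of_notMem (by simpa using h)]

theorem pvCard_mono {P Q : List (Bool × Bool × Bool × Bool)} (h : P ⊆ Q) :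
    P.toFinset.card ≤ Q.toFinset.card :=
  Finset.card_le_card (fun x hx => by simp only [List.mem_toFinset] at *; exact h hx)

theorem pvSucc_len (s : Bool × Bool × Bool × Bool) : (SUCC_FN s).length ≤ 4 :=
  (by decide : ∀ t : Bool × Bool × Bool × Bool, (SUCC_FN t).length ≤ 4) s

-- PATH is mutated in place in Python, so A's recursion is ported state-passing style: runA returns
-- (final PATH, return value).  The subtype part (the given PATH is a prefix of the resulting PATH)
-- is only used by the termination measure.
def runA (STATES P : List (Bool × Bool × Bool × Bool)) :
    {r : (List (Bool × Bool × Bool × Bool)) × (List (Bool × Bool × Bool × Bool)) // P <+: r.1} :=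
  match STATES with
  | [] => ⟨(P, []), List.prefix_refl P⟩
  | s :: rest =>
    if FINAL_STATE s then ⟨(P ++ [s], P ++ [s]), List.prefix_append P [s]⟩
    else if hs : ON_PATH s P then
      let r := runA rest P
      ⟨r.1, r.2⟩
    else
      match runA (SUCC_FN s) (P ++ [s]) with
      | ⟨c, hcpre⟩ =>
        match runA rest c.1 with
        | ⟨r, hrpre⟩ =>
          ⟨r, ((P.prefix_append [s]).trans hcpre).trans hrpre⟩
termination_by (16 - P.toFinset.card) * 5 + STATES.length
decreasing_by
  · simp only [List.length_cons]; omega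
  · have hns : s ∉ P := by simpa [ON_PATH] using hs
    have h16 := pvCard_lt16 hns
    have hca := pvCard_append hns
    have hsl := pvSucc_len s
    simp only [List.length_cons]; omega
  · have hns : s ∉ P := by simpa [ON_PATH] using hs
    have h16 := pvCard_lt16 hns
    have hca := pvCard_append hns
    have hle : (P ++ [s]).toFinset.card ≤ c.1.toFinset.card := pvCard_mono hcpre.subset
    have hc16 := pvCard_le16 c.1
    simp only [List.length_cons]; omega

def MULT_DFS (STATES : List (Bool × Bool × Bool × Bool)) (PATH : List (Bool × Bool × Bool × Bool)) : List (Bool × Bool × Bool × Bool) :=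
  (runA STATES PATH).1.2

-- ===== PORT B =====
-- size of the stack (pending states plus frame count), for termination only
def stackSize (stk : List (List (Bool × Bool × Bool × Bool))) : Nat :=
  (stk.map (fun F => F.length + 1)).sum

theorem stackSize_cons (F : List (Bool × Bool × Bool × Bool)) (stk : List (List (Bool × Bool × Bool × Bool))) :
    stackSize (F :: stk) = F.length + 1 + stackSize stk := by
  simp [stackSize]

-- the while-loop of B: stk is the explicit stack of frames, P is PATH
def runB (stk : List (List (Bool × Bool × Bool × Bool))) (P : List (Bool × Bool × Bool × Bool)) :
    List (Bool × Bool × Bool × Bool) :=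
  match stk with
  | [] => []                                           -- while loop ended: return []
  | [] :: stk' => runB stk' P                          -- exhausted top frame: pop it
  | (s :: F) :: stk' =>                                -- s = frame.pop(0)
    if FINAL_STATE s then
      match stk' with
      | [] => P ++ [s]                                 -- final in the top-level frame: return PATH
      | G :: stk'' => runB (G :: stk'') (P ++ [s])     -- final aborts its own frame only
    else if ON_PATH s P then runB (F :: stk') P
    else runB (SUCC_FN s :: F :: stk') (P ++ [s])
termination_by (16 - P.toFinset.card) * 5 + stackSize stk
decreasing_by
  · simp only [stackSize_cons]; omega
  · have hle : P.toFinset.card ≤ (P ++ [s]).toFinset.card :=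
      pvCard_mono (fun x hx => by simp [List.mem_append]; exact Or.inl hx)
    have h2 : 16 - (P ++ [s]).toFinset.card ≤ 16 - P.toFinset.card := Nat.sub_le_sub_left hle 16
    simp only [stackSize_cons, List.length_cons]; omega
  · simp only [stackSize_cons, List.length_cons]; omega
  · rename_i hs
    have hns : s ∉ P := by simpa [ON_PATH] using hs
    have h16 := pvCard_lt16 hns
    have hca := pvCard_append hns
    have hsl := pvSucc_len s
    simp only [stackSize_cons, List.length_cons]; omega

def MULT_DFS_alt (STATES : List (Bool × Bool × Bool × Bool)) (PATH : List (Bool × Bool × Bool × Bool)) : List (Bool × Bool × Bool × Bool) :=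
  runB [STATES] PATH

-- ===== PRECONDITION & SPEC =====
def Spec_MULT_DFS (STATES : List (Bool × Bool × Bool × Bool)) (PATH : List (Bool × Bool × Bool × Bool)) (out : List (Bool × Bool × Bool × Bool)) : Prop := out = MULT_DFS_alt STATES PATH
instance (STATES : List (Bool × Bool × Bool × Bool)) (PATH : List (Bool × Bool × Bool × Bool)) (out : List (Bool × Bool × Bool × Bool)) : Decidable (Spec_MULT_DFS STATES PATH out) := by unfold Spec_MULT_DFS; infer_instance

-- ===== CLAIM (what is proved, stated in full; the proofs are below) =====
def Claim_equal_MULT_DFS : Prop := ∀ (STATES : List (Bool × Bool × Bool × Bool)) (PATH : List (Bool × Bool × Bool × Bool)), Dom_MULT_DFS STATES PATH → Spec_MULT_DFS STATES PATH (MULT_DFS STATES PATH)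

-- ===== LEMMAS AND PROOFS =====

-- value-level unfolding lemmas for runA
theorem runA_nil (P : List (Bool × Bool × Bool × Bool)) : (runA [] P).1 = (P, []) := by
  rw [runA]

theorem runA_final {s : Bool × Bool × Bool × Bool} (rest P : List (Bool × Bool × Bool × Bool))
    (h : FINAL_STATE s = true) : (runA (s :: rest) P).1 = (P ++ [s], P ++ [s]) := by
  rw [runA]; simp [h]

theorem runA_skip {s : Bool × Bool × Bool × Bool} (rest P : List (Bool × Bool × Bool × Bool))
    (h1 : FINAL_STATE s = false) (h2 : ON_PATH s P = true) :
    (runA (s :: rest) P).1 = (runA rest P).1 := by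
  rw [runA]; simp [h1, h2]

theorem runA_desc {s : Bool × Bool × Bool × Bool} (rest P : List (Bool × Bool × Bool × Bool))
    (h1 : FINAL_STATE s = false) (h2 : ON_PATH s P = false) :
    (runA (s :: rest) P).1 = (runA rest (runA (SUCC_FN s) (P ++ [s])).1.1).1 := by
  rw [runA]; simp [h1, h2]

-- unfolding lemmas for runB
theorem runB_nil (P : List (Bool × Bool × Bool × Bool)) : runB [] P = [] := by rw [runB.eq_def]

theorem runB_pop (stk : List (List (Bool × Bool × Bool × Bool))) (P : List (Bool × Bool × Bool × Bool)) :
    runB ([] :: stk) P = runB stk P := by rw [runB.eq_def]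

theorem runB_cons (s : Bool × Bool × Bool × Bool) (F : List (Bool × Bool × Bool × Bool))
    (stk : List (List (Bool × Bool × Bool × Bool))) (P : List (Bool × Bool × Bool × Bool)) :
    runB ((s :: F) :: stk) P =
      if FINAL_STATE s then
        (match stk with
         | [] => P ++ [s]
         | _ :: _ => runB stk (P ++ [s]))
      else if ON_PATH s P then runB (F :: stk) P
      else runB (SUCC_FN s :: F :: stk) (P ++ [s]) := by
  rw [runB.eq_def]
  cases stk <;> rfl

-- The stack machine started on frame F above stack stk runs A's recursion on F; if the frame is
-- top-level the loop's result is A's return value, otherwise it continues on stk with the PATH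
-- A's recursion leaves behind.
theorem runB_sim (n : Nat) : ∀ (F : List (Bool × Bool × Bool × Bool)) stk P,
    (16 - P.toFinset.card) * 5 + stackSize (F :: stk) ≤ n →
    runB (F :: stk) P =
      (match stk with
       | [] => (runA F P).1.2
       | _ :: _ => runB stk (runA F P).1.1) := by
  induction n with
  | zero =>
    intro F stk P h
    rw [stackSize_cons] at h; omega
  | succ n ih =>
    intro F stk P h
    match F with
    | [] =>
      rw [runB_pop]
      match stk with
      | [] => rw [runB_nil, runA_nil]
      | G :: stk' => rw [runA_nil]
    | s :: F' =>
      rw [runB_cons]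
      by_cases hf : FINAL_STATE s
      · simp only [hf, if_true]
        match stk with
        | [] => rw [runA_final _ _ hf]
        | G :: stk' => rw [runA_final _ _ hf]
      · have hf' : FINAL_STATE s = false := by simpa using hf
        by_cases hp : ON_PATH s P
        · simp only [hf', Bool.false_eq_true, if_false, hp, if_true]
          have hm : (16 - P.toFinset.card) * 5 + stackSize (F' :: stk) ≤ n := by
            simp only [stackSize_cons, List.length_cons] at h ⊢; omega
          rw [ih F' stk P hm, runA_skip _ _ hf' hp]
        · have hp' : ON_PATH s P = false := by simpa using hp
          simp only [hf', Bool.false_eq_true, if_false, hp', if_false]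
          have hns : s ∉ P := by simpa [ON_PATH] using hp'
          have h16 := pvCard_lt16 hns
          have hca := pvCard_append hns
          have hsl := pvSucc_len s
          -- first IH use: run the child frame to completion
          have hm1 : (16 - (P ++ [s]).toFinset.card) * 5 + stackSize (SUCC_FN s :: F' :: stk) ≤ n := by
            simp only [stackSize_cons, List.length_cons] at h ⊢; omega
          rw [ih (SUCC_FN s) (F' :: stk) (P ++ [s]) hm1]
          -- second IH use: continue with the rest of this frame on the extended PATH
          have hpre : (P ++ [s]) <+: (runA (SUCC_FN s) (P ++ [s])).1.1 := (runA (SUCC_FN s) (P ++ [s])).2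
          have hle := pvCard_mono hpre.subset
          have hc16 := pvCard_le16 (runA (SUCC_FN s) (P ++ [s])).1.1
          have hm2 : (16 - (runA (SUCC_FN s) (P ++ [s])).1.1.toFinset.card) * 5
              + stackSize (F' :: stk) ≤ n := by
            simp only [stackSize_cons, List.length_cons] at h ⊢; omega
          rw [ih F' stk (runA (SUCC_FN s) (P ++ [s])).1.1 hm2, runA_desc _ _ hf' hp']

theorem MULT_DFS_spec : Claim_equal_MULT_DFS := by
  intro STATES PATH _
  unfold Spec_MULT_DFS MULT_DFS MULT_DFS_alt
  rw [runB_sim ((16 - PATH.toFinset.card) * 5 + stackSize [STATES]) STATES [] PATH le_rfl]
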